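-- pv_equiv track=rewrite | github.com/bklynhlth/openwillis | openwillis/measures/text/util/diarization_utils.py | create_diarized_text
-- ===== SOURCE A (Python) =====
-- def create_diarized_text(word_labels, speaker_labels):
--     """
--     ------------------------------------------------------------------------------------------------------
--
--     This function creates a diarized text from word and speaker labels.
--
--     Parameters:
--     ...........
--     word_labels: list
--         List of words.
--     speaker_labels: list
--         List of speaker labels.
--
--     Returns:
--     ...........
--     str: Diarized text.
--      e.g. "<spk:1> hello <spk:2> how are you <spk:1> I am fine"
--
--     ------------------------------------------------------------------------------------------------------
--     """
--     output = []
--     previous_speaker = None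
--
--     for word, speaker in zip(word_labels, speaker_labels):
--         if speaker != previous_speaker:
--             output.append("<spk:" + speaker + ">")
--
--         output.append(word)
--         previous_speaker = speaker
--
--     return " ".join(output)
-- ===== SOURCE B (Python) =====
-- from itertools import groupby
--
--
-- def create_diarized_text(word_labels, speaker_labels):
--     segments = [
--         "<spk:" + speaker + "> " + " ".join(w for w, _ in run)
--         for speaker, run in groupby(zip(word_labels, speaker_labels), key=lambda p: p[1])
--     ]
--     return " ".join(segments)
-- ===== Notes on version B (the rewrite author's own statement) =====
-- stated objective: idiomatic
-- what changed: Replaces the per-word loop with a previous_speaker sentinel by an itertools.groupby decomposition: split the zipped stream into consecutive same-speaker runs, format each run as one segment string, and join the segments.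
import Mathlib
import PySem

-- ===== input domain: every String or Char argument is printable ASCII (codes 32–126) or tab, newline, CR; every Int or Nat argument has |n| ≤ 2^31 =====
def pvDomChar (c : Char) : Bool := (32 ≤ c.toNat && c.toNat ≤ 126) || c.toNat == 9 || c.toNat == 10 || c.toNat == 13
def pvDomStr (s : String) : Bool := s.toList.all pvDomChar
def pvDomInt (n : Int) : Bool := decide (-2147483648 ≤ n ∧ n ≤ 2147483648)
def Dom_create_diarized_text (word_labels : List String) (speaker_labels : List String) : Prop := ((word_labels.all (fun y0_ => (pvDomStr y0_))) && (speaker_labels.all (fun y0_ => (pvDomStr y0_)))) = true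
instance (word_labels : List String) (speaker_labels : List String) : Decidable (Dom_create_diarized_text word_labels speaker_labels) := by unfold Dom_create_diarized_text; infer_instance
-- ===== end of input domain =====

-- ===== PORT A =====
-- B's objective (header): B rebuilds the same diarized text by grouping consecutive
-- same-speaker words into runs and formatting each run as one segment (more idiomatic
-- groupby decomposition); same cost as A.
def create_diarized_text (word_labels : List String) (speaker_labels : List String) : String :=
  PySem.Str.join " " ((word_labels.zip speaker_labels).foldl
    (fun (acc : List String × Option String) (p : String × String) =>
      let output := if some p.2 ≠ acc.2 then acc.1 ++ ["<spk:" ++ p.2 ++ ">"] else acc.1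
      (output ++ [p.1], some p.2)) ([], none)).1

-- ===== PORT B =====
-- consecutive same-speaker runs of the zipped stream (itertools.groupby, ported by hand)
def pvRuns : List (String × String) → List (String × List String)
  | [] => []
  | (w, s) :: rest =>
      (s, w :: (rest.takeWhile (fun q => q.2 == s)).map Prod.fst)
        :: pvRuns (rest.dropWhile (fun q => q.2 == s))
  termination_by ps => ps.length
  decreasing_by
    simp only [List.length_cons]
    exact Nat.lt_succ_of_le (List.length_dropWhile_le _ _)

def pvSegment (g : String × List String) : String :=
  "<spk:" ++ g.1 ++ "> " ++ PySem.Str.join " " g.2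

def create_diarized_text_alt (word_labels : List String) (speaker_labels : List String) : String :=
  PySem.Str.join " " ((pvRuns (word_labels.zip speaker_labels)).map pvSegment)

-- ===== PRECONDITION & SPEC =====
def Spec_create_diarized_text (word_labels : List String) (speaker_labels : List String) (out : String) : Prop := out = create_diarized_text_alt word_labels speaker_labels
instance (word_labels : List String) (speaker_labels : List String) (out : String) : Decidable (Spec_create_diarized_text word_labels speaker_labels out) := by unfold Spec_create_diarized_text; infer_instance

-- ===== CLAIM (what is proved, stated in full; the proofs are below) =====
def Claim_equal_create_diarized_text : Prop := ∀ (word_labels : List String) (speaker_labels : List String), Dom_create_diarized_text word_labels speaker_labels → Spec_create_diarized_text word_labels speaker_labels (create_diarized_text word_labels speaker_labels)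

-- ===== LEMMAS AND PROOFS =====

-- A's loop, written as structural recursion over the remaining pairs
def pvALoop (prev : Option String) : List (String × String) → List String
  | [] => []
  | p :: rest =>
      (if some p.2 ≠ prev then ["<spk:" ++ p.2 ++ ">"] else []) ++ p.1 :: pvALoop (some p.2) rest

-- the tokens A emits for one run-group
def pvTok (g : String × List String) : List String := ("<spk:" ++ g.1 ++ ">") :: g.2

theorem pvFoldl_eq (ps : List (String × String)) :
    ∀ (acc : List String) (prev : Option String),
      (ps.foldl
        (fun (acc : List String × Option String) (p : String × String) =>
          let output := if some p.2 ≠ acc.2 then acc.1 ++ ["<spk:" ++ p.2 ++ ">"] else acc.1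
          (output ++ [p.1], some p.2)) (acc, prev)).1
      = acc ++ pvALoop prev ps := by
  induction ps with
  | nil => intro acc prev; simp [pvALoop]
  | cons p rest ih =>
      intro acc prev
      rw [List.foldl_cons]
      refine (ih ((if some p.2 ≠ prev then acc ++ ["<spk:" ++ p.2 ++ ">"] else acc) ++ [p.1])
        (some p.2)).trans ?_
      by_cases h : some p.2 = prev
      · simp [pvALoop, h]
      · simp [pvALoop, h]

theorem pvALoop_run (run : List (String × String)) :
    ∀ (rest : List (String × String)) (s : String), (∀ q ∈ run, q.2 = s) →
      pvALoop (some s) (run ++ rest) = run.map Prod.fst ++ pvALoop (some s) rest := by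
  induction run with
  | nil => intro rest s _; simp
  | cons q run ih =>
      intro rest s h
      have hq : q.2 = s := h q (by simp)
      simp only [List.cons_append, pvALoop, hq]
      simp [ih rest s (fun q hq' => h q (by simp [hq']))]

theorem pvALoop_tokens (n : Nat) :
    ∀ (ps : List (String × String)) (prev : Option String), ps.length ≤ n →
      (∀ w s r, ps = (w, s) :: r → prev ≠ some s) →
      pvALoop prev ps = (pvRuns ps).flatMap pvTok := by
  induction n with
  | zero =>
      intro ps prev hlen _
      have : ps = [] := List.eq_nil_of_length_eq_zero (Nat.le_zero.mp hlen)
      simp [this, pvALoop, pvRuns]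
  | succ n ih =>
      intro ps prev hlen hhd
      match ps with
      | [] => simp [pvALoop, pvRuns]
      | (w, s) :: rest =>
          have hne : some s ≠ prev := fun h => hhd w s rest rfl h.symm
          have hsplit : rest = rest.takeWhile (fun q => q.2 == s) ++ rest.dropWhile (fun q => q.2 == s) :=
            (List.takeWhile_append_dropWhile).symm
          have htw : ∀ q ∈ rest.takeWhile (fun q => q.2 == s), q.2 = s := by
            intro q hq
            have := List.mem_takeWhile_imp hq
            simpa using this
          have hlen1 : (rest.dropWhile (fun q => q.2 == s)).length ≤ n := by
            have h1 := List.length_dropWhile_le (fun q : String × String => q.2 == s) rest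
            have : rest.length ≤ n := by simpa using Nat.le_of_succ_le_succ hlen
            omega
          have hhd2 : ∀ w' s' r', rest.dropWhile (fun q => q.2 == s) = (w', s') :: r' →
              (some s : Option String) ≠ some s' := by
            intro w' s' r' he
            have := List.head?_dropWhile_not (fun q : String × String => q.2 == s) rest
            rw [he] at this
            simp at this
            intro hc
            exact this (by injection hc with h; exact h.symm)
          calc pvALoop prev ((w, s) :: rest)
              = ("<spk:" ++ s ++ ">") :: w :: pvALoop (some s) rest := by
                simp [pvALoop, hne]
            _ = ("<spk:" ++ s ++ ">") :: w ::
                  ((rest.takeWhile (fun q => q.2 == s)).map Prod.fst ++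
                   pvALoop (some s) (rest.dropWhile (fun q => q.2 == s))) := by
                conv_lhs => rw [hsplit]
                rw [pvALoop_run _ _ _ htw]
            _ = (pvRuns ((w, s) :: rest)).flatMap pvTok := by
                rw [ih _ (some s) hlen1 hhd2]
                simp [pvRuns, pvTok]

theorem pvRuns_snd_ne_nil (ps : List (String × String)) :
    ∀ g ∈ pvRuns ps, g.2 ≠ [] := by
  induction ps using pvRuns.induct with
  | case1 => simp [pvRuns]
  | case2 w s rest ih =>
      intro g hg
      simp only [pvRuns, List.mem_cons] at hg
      rcases hg with h | h
      · subst h; simp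
      · exact ih g h

theorem pvJoin_append (sep : List Char) :
    ∀ (xs ys : List (List Char)), xs ≠ [] → ys ≠ [] →
      PySem.Chars.join sep (xs ++ ys)
        = PySem.Chars.join sep xs ++ sep ++ PySem.Chars.join sep ys := by
  intro xs
  induction xs with
  | nil => intro ys h; exact absurd rfl h
  | cons a xs ih =>
      intro ys _ hys
      match xs with
      | [] =>
          match ys with
          | b :: ys' =>
              simp [PySem.Chars.join_singleton, PySem.Chars.join_cons_cons]
      | c :: xs' =>
          have := ih ys (by simp) hys
          simp only [List.cons_append] at this ⊢
          rw [PySem.Chars.join_cons_cons, PySem.Chars.join_cons_cons, this]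
          simp [List.append_assoc]

theorem pvSeg_toList (g : String × List String) (hg : g.2 ≠ []) :
    PySem.Chars.join (" ".toList) ((pvTok g).map String.toList) = (pvSegment g).toList := by
  match g, hg with
  | (s, w :: ws), _ =>
      simp [pvTok, pvSegment, PySem.Chars.join_cons_cons, PySem.Str.toList_join,
        String.toList_append]

theorem pvFlatMap_tok_ne_nil (g : String × List String) (gs : List (String × List String)) :
    (g :: gs).flatMap pvTok ≠ [] := by
  simp [pvTok]

theorem pvJoin_groups (gs : List (String × List String)) (h : ∀ g ∈ gs, g.2 ≠ []) :
    PySem.Str.join " " (gs.flatMap pvTok) = PySem.Str.join " " (gs.map pvSegment) := by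
  apply String.toList_inj.mp
  rw [PySem.Str.toList_join, PySem.Str.toList_join]
  induction gs with
  | nil => simp
  | cons g gs ih =>
      have hg : g.2 ≠ [] := h g (by simp)
      match gs with
      | [] =>
          simp only [List.flatMap_cons, List.flatMap_nil, List.append_nil, List.map_cons,
            List.map_nil, PySem.Chars.join_singleton]
          exact pvSeg_toList g hg
      | g' :: gs' =>
          have ih' := ih (fun x hx => h x (by simp [hx]))
          rw [List.flatMap_cons, List.map_append,
            pvJoin_append _ _ _ (by simp [pvTok]) (by simpa using pvFlatMap_tok_ne_nil g' gs'),
            ih', pvSeg_toList g hg]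
          simp [PySem.Chars.join_cons_cons, List.append_assoc]

-- ===== VERDICT (by name: the statement is the Claim_ definition above) =====
theorem create_diarized_text_spec : Claim_equal_create_diarized_text := by
  intro wl sl _
  unfold Spec_create_diarized_text create_diarized_text create_diarized_text_alt
  rw [pvFoldl_eq (wl.zip sl) [] none, List.nil_append,
    pvALoop_tokens (wl.zip sl).length _ none le_rfl (by intro _ _ _ _; simp),
    pvJoin_groups _ (pvRuns_snd_ne_nil _)]
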